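-- pv_equiv track=rewrite | github.com/ivanwakeup/algorithms | algorithms/prep/microsoft/string_without_3_consec.py | string_without_3_consec
-- ===== SOURCE A (Python) =====
-- def string_without_3_consec(s):
--     if not s or len(s) == 1:
--         return s
--     count = 0
--     result = [s[0]]
--     for i in range(1, len(s)):
--         if s[i] == s[i-1]:
--             count+=1
--         else:
--             count=0
--         if count >= 2:
--             continue
--         else:
--             result.append(s[i])
--     return "".join(result)
-- ===== SOURCE B (Python) =====
-- from itertools import groupby
--
--
-- def string_without_3_consec(s):
--     return "".join(ch * min(len(list(grp)), 2) for ch, grp in groupby(s))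
-- ===== Notes on version B (the rewrite author's own statement) =====
-- stated objective: simpler
-- what changed: Replaced the index loop with a running repeat counter by run-length grouping (itertools.groupby) that clamps each maximal run to at most 2 characters.
import Mathlib
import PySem

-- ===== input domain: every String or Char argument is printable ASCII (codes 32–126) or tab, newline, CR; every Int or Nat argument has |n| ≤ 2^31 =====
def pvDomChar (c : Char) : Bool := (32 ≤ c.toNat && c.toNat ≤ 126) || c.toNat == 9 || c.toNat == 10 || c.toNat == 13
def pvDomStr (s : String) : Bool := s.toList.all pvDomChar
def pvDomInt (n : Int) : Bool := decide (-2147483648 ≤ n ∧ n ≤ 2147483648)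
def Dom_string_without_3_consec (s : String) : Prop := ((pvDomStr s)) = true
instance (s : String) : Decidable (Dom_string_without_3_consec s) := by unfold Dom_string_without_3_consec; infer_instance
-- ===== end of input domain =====

-- B replaces A's running per-character repeat counter and index-back comparison by
-- run-length grouping (groupby) with each maximal run clamped to at most 2 characters (objective: simpler).

-- ===== PORT A =====
-- literal port: early return, then 'for i in range(1, len(s))' as a foldl over pyRange,
-- with state (count, result) and s[i]/s[i-1] read via pyGetD (indices are always in range)
def string_without_3_consec (s : String) : String :=
  if s.toList = [] ∨ PySem.Str.len s = 1 then s
  else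
    let cs := s.toList
    let st := (PySem.List.pyRange 1 (PySem.Str.len s) 1).foldl
      (fun (acc : Int × List Char) i =>
        let count := if PySem.List.pyGetD cs i ' ' == PySem.List.pyGetD cs (i - 1) ' '
                     then acc.1 + 1 else 0
        if count ≥ 2 then (count, acc.2) else (count, acc.2 ++ [PySem.List.pyGetD cs i ' ']))
      (0, [PySem.List.pyGetD cs 0 ' '])
    String.ofList st.2

-- ===== PORT B =====
-- itertools.groupby(s): the list of maximal runs as (char, run length) pairs
def pyGroupby : List Char → List (Char × Nat)
  | [] => []
  | c :: rest =>
    let p := rest.span (· == c)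
    (c, p.1.length + 1) :: pyGroupby p.2
termination_by l => l.length
decreasing_by
  simp only [List.span_eq_takeWhile_dropWhile, List.length_cons]
  exact Nat.lt_succ_of_le (List.length_dropWhile_le _ _)

-- ''.join(ch * min(count, 2) for ch, grp in groupby(s))
def string_without_3_consec_alt (s : String) : String :=
  String.ofList ((pyGroupby s.toList).flatMap (fun p => List.replicate (min p.2 2) p.1))

-- ===== PRECONDITION & SPEC =====
def Spec_string_without_3_consec (s : String) (out : String) : Prop := out = string_without_3_consec_alt s
instance (s : String) (out : String) : Decidable (Spec_string_without_3_consec s out) := by unfold Spec_string_without_3_consec; infer_instance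

-- ===== CLAIM (what is proved, stated in full; the proofs are below) =====
def Claim_equal_string_without_3_consec : Prop := ∀ (s : String), Dom_string_without_3_consec s → Spec_string_without_3_consec s (string_without_3_consec s)

-- ===== LEMMAS AND PROOFS =====

-- proof-side: fold over adjacent pairs (prev, cur)
def adjFold {St : Type} (f : St → Char → Char → St) : St → Char → List Char → St
  | acc, _, [] => acc
  | acc, prev, x :: xs => adjFold f (f acc prev x) x xs

-- A's index fold over range(k+1, len) equals an adjacent-pair fold on the suffix
lemma idx_fold {St : Type} (f : St → Char → Char → St) (d : Char) :
    ∀ (m : Nat) (cs : List Char) (k : Nat) (init : St) (_ : cs.length - k ≤ m) (hk : k < cs.length),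
    (PySem.List.pyRange ((k : Int) + 1) (cs.length : Int) 1).foldl
        (fun acc i => f acc (PySem.List.pyGetD cs (i - 1) d) (PySem.List.pyGetD cs i d)) init
      = adjFold f init (cs[k]'hk) (cs.drop (k + 1)) := by
  intro m
  induction m with
  | zero => intro cs k init hm hk; omega
  | succ m ih =>
    intro cs k init hm hk
    by_cases hlt : k + 1 < cs.length
    · have hcons : PySem.List.pyRange ((k : Int) + 1) (cs.length : Int) 1
          = ((k : Int) + 1) :: PySem.List.pyRange ((k : Int) + 1 + 1) (cs.length : Int) 1 := by
        apply PySem.List.pyRange_one_cons; exact_mod_cast hlt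
      rw [hcons]
      simp only [List.foldl_cons]
      have e1 : ((k : Int) + 1 - 1) = (k : Int) := by ring
      have e2 : ((k : Int) + 1) = ((k + 1 : Nat) : Int) := by push_cast; ring
      rw [e1, e2, PySem.List.pyGetD_ofNat cs k _ hk, PySem.List.pyGetD_ofNat cs (k+1) _ hlt,
        ih cs (k+1) _ (by omega) hlt]
      rw [List.drop_eq_getElem_cons hlt]
      rfl
    · have hk1 : k + 1 = cs.length := by omega
      have hnil : PySem.List.pyRange ((k : Int) + 1) (cs.length : Int) 1 = [] := by
        apply PySem.List.pyRange_one_eq_nil; omega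
      rw [hnil, List.drop_eq_nil_of_le (by omega)]
      rfl

-- proof-side clean recursion equal to A's loop body
def goA : List Char → Char → Int → List Char
  | [], _, _ => []
  | x :: xs, prev, count =>
    let c' := if x == prev then count + 1 else 0
    if c' ≥ 2 then goA xs x c' else x :: goA xs x c'

def stepA (acc : Int × List Char) (prev x : Char) : Int × List Char :=
  let count := if x == prev then acc.1 + 1 else 0
  if count ≥ 2 then (count, acc.2) else (count, acc.2 ++ [x])

lemma adjFold_stepA (rest : List Char) : ∀ (cnt : Int) (res : List Char) (prev : Char),
    (adjFold stepA (cnt, res) prev rest).2 = res ++ goA rest prev cnt := by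
  induction rest with
  | nil => intro cnt res prev; simp [adjFold, goA]
  | cons x xs ih =>
    intro cnt res prev
    simp only [adjFold, goA, stepA]
    by_cases hx : x == prev
    · simp only [hx, if_true]
      by_cases h2 : cnt + 1 ≥ 2
      · simp [h2, ih]
      · simp [h2, ih]
    · simp only [hx]
      have : ¬ ((0 : Int) ≥ 2) := by omega
      simp [this, ih]

def clampB (l : List (Char × Nat)) : List Char :=
  l.flatMap (fun p => List.replicate (min p.2 2) p.1)

lemma goA_groupby : ∀ (n : Nat) (cs : List Char), cs.length ≤ n →
    (∀ c, c :: goA cs c 0 = clampB (pyGroupby (c :: cs))) ∧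
    (∀ c (count : Int), 1 ≤ count → goA cs c count = clampB (pyGroupby (cs.dropWhile (· == c)))) := by
  intro n
  induction n with
  | zero =>
    intro cs hlen
    have hnil : cs = [] := List.length_eq_zero_iff.mp (Nat.le_zero.mp hlen)
    subst hnil
    constructor
    · intro c; simp [goA, pyGroupby, List.span_eq_takeWhile_dropWhile, clampB]
    · intro c count _; simp [goA, pyGroupby, clampB]
  | succ n ih =>
    intro cs hlen
    match cs with
    | [] =>
      constructor
      · intro c; simp [goA, pyGroupby, List.span_eq_takeWhile_dropWhile, clampB]
      · intro c count _; simp [goA, pyGroupby, clampB]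
    | x :: xs =>
      have hxs : xs.length ≤ n := by simpa using hlen
      obtain ⟨iha, ihb⟩ := ih xs hxs
      constructor
      · intro c
        by_cases hx : x == c
        · have hxc : x = c := beq_iff_eq.mp hx
          subst hxc
          have h1 : goA (x :: xs) x 0 = x :: goA xs x 1 := by norm_num [goA]
          have h2 : pyGroupby (x :: x :: xs)
              = (x, (xs.takeWhile (· == x)).length + 2) :: pyGroupby (xs.dropWhile (· == x)) := by
            rw [pyGroupby]
            simp [List.span_eq_takeWhile_dropWhile]
          rw [h1, h2, ihb x 1 (by norm_num)]
          simp [clampB, List.replicate]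
        · have h1 : goA (x :: xs) c 0 = x :: goA xs x 0 := by norm_num [goA, hx]
          have h2 : pyGroupby (c :: x :: xs) = (c, 1) :: pyGroupby (x :: xs) := by
            rw [pyGroupby]
            simp [List.span_eq_takeWhile_dropWhile, hx]
          have h3 : clampB ((c, 1) :: pyGroupby (x :: xs)) = c :: clampB (pyGroupby (x :: xs)) := by
            simp [clampB]
          rw [h1, h2, h3, ← iha x]
      · intro c count hcount
        by_cases hx : x == c
        · have hxc : x = c := beq_iff_eq.mp hx
          subst hxc
          have h1 : goA (x :: xs) x count = goA xs x (count + 1) := by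
            have : (if (x == x) then count + 1 else 0) ≥ 2 ∨
                ¬ (if (x == x) then count + 1 else 0) ≥ 2 := em _
            simp only [goA, BEq.rfl, if_true]
            have hge : count + 1 ≥ 2 ∨ ¬ count + 1 ≥ 2 := em _
            rcases hge with h | h
            · simp [h]
            · omega
          rw [h1, ihb x (count + 1) (by omega)]
          simp
        · have h1 : goA (x :: xs) c count = x :: goA xs x 0 := by norm_num [goA, hx]
          rw [h1, List.dropWhile_cons_of_neg (by simpa using hx), ← iha x]

-- ===== VERDICT (by name: the statement is the Claim_ definition above) =====
theorem string_without_3_consec_spec : Claim_equal_string_without_3_consec := by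
  intro s _
  unfold Spec_string_without_3_consec string_without_3_consec string_without_3_consec_alt
  by_cases h0 : s.toList = [] ∨ PySem.Str.len s = 1
  · rw [if_pos h0]
    rcases h0 with h | h
    · conv_lhs => rw [← String.ofList_toList (s := s)]
      rw [h]
      simp [pyGroupby]
    · have hl : s.toList.length = 1 := by
        have he := PySem.Str.len_eq s
        rw [h] at he; exact_mod_cast he.symm
      obtain ⟨c, hc⟩ := List.length_eq_one_iff.mp hl
      conv_lhs => rw [← String.ofList_toList (s := s)]
      rw [hc, pyGroupby]
      simp [pyGroupby, List.span_eq_takeWhile_dropWhile]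
  · rw [if_neg h0]
    have hne : s.toList ≠ [] := fun h => h0 (Or.inl h)
    obtain ⟨x, xs, hcs⟩ : ∃ x xs, s.toList = x :: xs := by
      cases hh : s.toList with
      | nil => exact absurd hh hne
      | cons a l => exact ⟨a, l, rfl⟩
    have hlen : 0 < s.toList.length := by rw [hcs]; simp
    have hfold := idx_fold (St := Int × List Char) stepA ' '
      s.toList.length s.toList 0 ((0 : Int), [PySem.List.pyGetD s.toList 0 ' ']) (by omega) hlen
    simp only [Nat.cast_zero, zero_add] at hfold
    simp only [PySem.Str.len_eq]
    rw [show (fun (acc : Int × List Char) i =>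
        let count := if PySem.List.pyGetD s.toList i ' ' == PySem.List.pyGetD s.toList (i - 1) ' '
                     then acc.1 + 1 else 0
        if count ≥ 2 then (count, acc.2) else (count, acc.2 ++ [PySem.List.pyGetD s.toList i ' ']))
      = (fun (acc : Int × List Char) i =>
          stepA acc (PySem.List.pyGetD s.toList (i - 1) ' ') (PySem.List.pyGetD s.toList i ' ')) from rfl]
    rw [hfold, adjFold_stepA]
    have hget0 : PySem.List.pyGetD s.toList 0 ' ' = x := by
      rw [hcs]; simp [pysem]
    have hgetE : s.toList[0]'hlen = x := by
      simp [hcs]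
    rw [hget0, hgetE, hcs]
    simp only [List.drop_one, List.tail_cons, List.singleton_append]
    rw [(goA_groupby xs.length xs le_rfl).1 x]
    rfl
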